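-- pv_equiv track=rewrite | github.com/BranchingBad/zone-poker | modules/export_txt.py | _format_cloud_enum_txt
-- ===== SOURCE A (Python) =====
-- from typing import Any, Callable, Dict, List
--
-- def _format_cloud_enum_txt(data: Dict[str, Any]) -> List[str]:
--     """Formats Cloud Enumeration for the text report."""
--     report = []
--     s3 = data.get("s3_buckets", [])
--     azure_blobs = data.get("azure_blobs", [])
--     if not s3 and not azure_blobs:
--         return ["No public S3 or Azure Blob containers found."]
--     if s3:
--         report.append("Discovered S3 Buckets:")
--         for bucket in s3:
--             report.append(f"  - {bucket.get('url')} (Status: {bucket.get('status')})")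
--     if azure_blobs:
--         if s3:
--             report.append("")
--         report.append("Discovered Azure Blob Containers:")
--         for blob in azure_blobs:
--             report.append(f"  - {blob.get('url')} (Status: {blob.get('status')})")
--     return report
-- ===== SOURCE B (Python) =====
-- from typing import Any, Dict, List
--
-- def _line(item) -> str:
--     return f"  - {item.get('url')} (Status: {item.get('status')})"
--
-- def _emit(items, tail: List[str]) -> List[str]:
--     # cons-recursion over items, threading the already-built rest of the report
--     if not items:
--         return tail
--     return [_line(items[0])] + _emit(items[1:], tail)
--
-- def _sections(secs) -> List[str]:
--     # build the report back-to-front by recursion over the section table;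
--     # the blank separator exists exactly when a later section already produced output
--     if not secs:
--         return []
--     (title, items) = secs[0]
--     tail = _sections(secs[1:])
--     if not items:
--         return tail
--     sep = [""] if tail else []
--     return [title] + _emit(items, sep + tail)
--
-- def _format_cloud_enum_txt(data: Dict[str, Any]) -> List[str]:
--     """Formats Cloud Enumeration for the text report."""
--     s3 = data.get("s3_buckets", [])
--     az = data.get("azure_blobs", [])
--     if not s3 and not az:
--         return ["No public S3 or Azure Blob containers found."]
--     return _sections([("Discovered S3 Buckets:", s3),
--                       ("Discovered Azure Blob Containers:", az)])
-- ===== Notes on version B (the rewrite author's own statement) =====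
-- stated objective: alternative
-- what changed: B replaces A's forward accumulator with interleaved conditional appends by a back-to-front recursive construction: a recursive section walker builds the later sections first and threads that result as a tail through a cons-recursive line emitter, the blank separator appearing exactly when the tail is non-empty.
import Mathlib
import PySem

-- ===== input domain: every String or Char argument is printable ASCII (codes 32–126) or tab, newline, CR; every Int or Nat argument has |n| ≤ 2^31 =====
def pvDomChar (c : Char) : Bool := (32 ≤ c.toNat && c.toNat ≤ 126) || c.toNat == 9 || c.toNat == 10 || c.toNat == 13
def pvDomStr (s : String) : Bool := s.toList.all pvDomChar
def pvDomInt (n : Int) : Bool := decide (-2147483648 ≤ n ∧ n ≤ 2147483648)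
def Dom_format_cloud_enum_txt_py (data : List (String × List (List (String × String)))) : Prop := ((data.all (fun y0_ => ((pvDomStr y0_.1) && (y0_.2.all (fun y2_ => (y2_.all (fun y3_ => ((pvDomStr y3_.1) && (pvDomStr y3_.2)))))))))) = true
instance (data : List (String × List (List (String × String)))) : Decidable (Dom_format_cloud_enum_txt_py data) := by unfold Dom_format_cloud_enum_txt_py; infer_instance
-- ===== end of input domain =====

-- B builds the report back-to-front: a recursive section walker constructs later sections
-- first and threads them as a tail through a cons-recursive line emitter (alternative decomposition).

-- ===== PORT A =====
-- f"  - {bucket.get('url')} (Status: {bucket.get('status')})"; .get misses render as "None"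
def pvLineA (b : List (String × String)) : String :=
  "  - " ++ ((PySem.Dict.mk b).get? "url").getD "None" ++ " (Status: " ++
    ((PySem.Dict.mk b).get? "status").getD "None" ++ ")"

def format_cloud_enum_txt_py (data : List (String × List (List (String × String)))) : List String :=
  let report : List String := []
  let s3 := (PySem.Dict.mk data).getD "s3_buckets" []
  let azure_blobs := (PySem.Dict.mk data).getD "azure_blobs" []
  if s3.isEmpty && azure_blobs.isEmpty then
    ["No public S3 or Azure Blob containers found."]
  else
    let report :=
      if !s3.isEmpty then
        s3.foldl (fun r bucket => r ++ [pvLineA bucket]) (report ++ ["Discovered S3 Buckets:"])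
      else report
    let report :=
      if !azure_blobs.isEmpty then
        azure_blobs.foldl (fun r blob => r ++ [pvLineA blob])
          ((if !s3.isEmpty then report ++ [""] else report) ++ ["Discovered Azure Blob Containers:"])
      else report
    report

-- ===== PORT B =====
def pvLineB (item : List (String × String)) : String :=
  "  - " ++ ((PySem.Dict.mk item).get? "url").getD "None" ++ " (Status: " ++
    ((PySem.Dict.mk item).get? "status").getD "None" ++ ")"

-- cons-recursion over items, threading the already-built rest of the report
def pvEmit (items : List (List (String × String))) (tail : List String) : List String :=
  match items with
  | [] => tail
  | i :: rest => [pvLineB i] ++ pvEmit rest tail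

-- recursion over the section table, building back-to-front; separator iff tail non-empty
def pvSections (secs : List (String × List (List (String × String)))) : List String :=
  match secs with
  | [] => []
  | (title, items) :: rest =>
    let tail := pvSections rest
    if items.isEmpty then tail
    else
      let sep : List String := if tail.isEmpty then [] else [""]
      [title] ++ pvEmit items (sep ++ tail)

def format_cloud_enum_txt_py_alt (data : List (String × List (List (String × String)))) : List String :=
  let s3 := (PySem.Dict.mk data).getD "s3_buckets" []
  let az := (PySem.Dict.mk data).getD "azure_blobs" []
  if s3.isEmpty && az.isEmpty then
    ["No public S3 or Azure Blob containers found."]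
  else
    pvSections [("Discovered S3 Buckets:", s3), ("Discovered Azure Blob Containers:", az)]

-- ===== PRECONDITION & SPEC =====
def Spec_format_cloud_enum_txt_py (data : List (String × List (List (String × String)))) (out : List String) : Prop := out = format_cloud_enum_txt_py_alt data
instance (data : List (String × List (List (String × String)))) (out : List String) : Decidable (Spec_format_cloud_enum_txt_py data out) := by unfold Spec_format_cloud_enum_txt_py; infer_instance

-- ===== CLAIM (what is proved, stated in full; the proofs are below) =====
def Claim_equal_format_cloud_enum_txt_py : Prop := ∀ (data : List (String × List (List (String × String)))), Dom_format_cloud_enum_txt_py data → Spec_format_cloud_enum_txt_py data (format_cloud_enum_txt_py data)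

-- ===== LEMMAS AND PROOFS =====
theorem pvEmit_eq_map (items : List (List (String × String))) (tail : List String) :
    pvEmit items tail = items.map pvLineB ++ tail := by
  induction items with
  | nil => rfl
  | cons i rest ih => simp [pvEmit, ih]

theorem flatten_map_singleton {α β : Type} (f : α → β) (xs : List α) :
    (xs.map (fun x => [f x])).flatten = xs.map f := by
  induction xs with
  | nil => rfl
  | cons x xs ih => simp [ih]

theorem pvLineA_eq_pvLineB : ∀ b, pvLineA b = pvLineB b := fun _ => rfl

-- ===== VERDICT (by name: the statement is the Claim_ definition above) =====
theorem format_cloud_enum_txt_py_spec : Claim_equal_format_cloud_enum_txt_py := by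
  intro data _
  unfold Spec_format_cloud_enum_txt_py format_cloud_enum_txt_py format_cloud_enum_txt_py_alt
  simp only []
  set s3 := (PySem.Dict.mk data).getD "s3_buckets" [] with hs3
  set az := (PySem.Dict.mk data).getD "azure_blobs" [] with haz
  by_cases h1 : s3.isEmpty <;> by_cases h2 : az.isEmpty <;>
    simp [h1, h2, pvSections, pvEmit_eq_map, flatten_map_singleton, pvLineA_eq_pvLineB,
      List.append_assoc]
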